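-- pv_equiv track=rewrite | github.com/zjunlp/SciNet | scinet/src/scinet/cli.py | generate_english_ngrams
-- ===== SOURCE A (Python) =====
-- EN_STOPWORDS = {
--
--     "a", "an", "the", "and", "or", "of", "for", "to", "in", "on", "with",
--
--     "by", "from", "as", "at", "is", "are", "was", "were", "be", "been",
--
--     "using", "use", "used", "based", "via", "into", "over", "under",
--
--     "between", "towards", "toward", "about", "this", "that", "these",
--
--     "those", "their", "its", "our", "your", "can", "could", "should",
--
--     "would", "may", "might", "research", "paper", "papers", "study",
--
--     "studies", "method", "methods", "system", "systems", "approach",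
--
--     "approaches", "task", "tasks", "result", "results",
--
-- }
--
-- def generate_english_ngrams(tokens: list[str], min_n: int = 1, max_n: int = 4) -> list[str]:
--
--     ngrams: list[str] = []
--
--
--
--     for n in range(min_n, max_n + 1):
--
--         for i in range(0, len(tokens) - n + 1):
--
--             gram_tokens = tokens[i: i + n]
--
--             if not gram_tokens:
--
--                 continue
--
--             if gram_tokens[0] in EN_STOPWORDS or gram_tokens[-1] in EN_STOPWORDS:
--
--                 continue
--
--             ngrams.append(" ".join(gram_tokens))
--
--
--
--     return ngrams
-- ===== SOURCE B (Python) =====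
-- EN_STOPWORDS = {
--     "a", "an", "the", "and", "or", "of", "for", "to", "in", "on", "with",
--     "by", "from", "as", "at", "is", "are", "was", "were", "be", "been",
--     "using", "use", "used", "based", "via", "into", "over", "under",
--     "between", "towards", "toward", "about", "this", "that", "these",
--     "those", "their", "its", "our", "your", "can", "could", "should",
--     "would", "may", "might", "research", "paper", "papers", "study",
--     "studies", "method", "methods", "system", "systems", "approach",
--     "approaches", "task", "tasks", "result", "results",
-- }
--
-- def generate_english_ngrams(tokens: list[str], min_n: int = 1, max_n: int = 4) -> list[str]:
--     # One pass over start positions: each gram is built incrementally from the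
--     # previous one and dropped into a per-length bucket; buckets are then
--     # concatenated in ascending length order.  N-gram lengths below 1 produce
--     # nothing (lo clamps them away).
--     lo = max(min_n, 1)
--     if lo > max_n:
--         return []
--     buckets: dict[int, list[str]] = {}
--     for i, first in enumerate(tokens):
--         if first in EN_STOPWORDS:
--             continue
--         gram = first
--         for n, tok in enumerate(tokens[i:i + max_n], start=1):
--             if n > 1:
--                 gram = gram + " " + tok
--             if n >= lo and tok not in EN_STOPWORDS:
--                 buckets.setdefault(n, []).append(gram)
--     out: list[str] = []
--     for n in range(lo, max_n + 1):
--         out += buckets.get(n, [])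
--     return out
-- ===== Notes on version B (the rewrite author's own statement) =====
-- stated objective: alternative
-- what changed: B loops over start positions once, extending each gram incrementally token-by-token and checking only the new last token, collecting grams into per-length buckets that are concatenated in ascending length order, instead of A's length-outer loop that re-slices and re-joins every window.
-- intended difference: When min_n is negative and some negative n in [min_n, min(max_n,-1)] makes Python's slice tokens[i:i+n] wrap (i+n<0) into a nonempty (len(tokens)+n)-gram passing the stopword filter, A returns those spurious wraparound grams ahead of the real ones, while B returns only grams of positive length, which is the intended meaning of an n-gram range. — e.g. on generate_english_ngrams(["x", "y"], -1, 1): A returns ["x", "x", "y"], B returns ["x", "y"]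
import Mathlib
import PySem

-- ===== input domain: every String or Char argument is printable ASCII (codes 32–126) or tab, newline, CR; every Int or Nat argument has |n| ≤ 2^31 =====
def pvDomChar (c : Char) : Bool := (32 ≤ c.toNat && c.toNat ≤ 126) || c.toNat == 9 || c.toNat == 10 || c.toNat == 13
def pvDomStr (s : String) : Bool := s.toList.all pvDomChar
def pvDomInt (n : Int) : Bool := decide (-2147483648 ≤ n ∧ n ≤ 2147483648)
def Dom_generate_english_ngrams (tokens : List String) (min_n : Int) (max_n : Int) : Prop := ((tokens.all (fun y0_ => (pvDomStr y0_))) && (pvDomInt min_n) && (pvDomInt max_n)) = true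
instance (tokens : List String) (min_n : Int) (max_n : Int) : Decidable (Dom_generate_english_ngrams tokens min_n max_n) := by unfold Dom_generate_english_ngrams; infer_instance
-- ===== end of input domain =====

-- B builds the grams in one pass over start positions, extending each gram incrementally
-- into per-length buckets (objective: alternative decomposition, same asymptotic cost).

-- ===== PORT A =====
def pvStops : List String :=
  ["a", "an", "the", "and", "or", "of", "for", "to", "in", "on", "with",
   "by", "from", "as", "at", "is", "are", "was", "were", "be", "been",
   "using", "use", "used", "based", "via", "into", "over", "under",
   "between", "towards", "toward", "about", "this", "that", "these",
   "those", "their", "its", "our", "your", "can", "could", "should",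
   "would", "may", "might", "research", "paper", "papers", "study",
   "studies", "method", "methods", "system", "systems", "approach",
   "approaches", "task", "tasks", "result", "results"]

def generate_english_ngrams (tokens : List String) (min_n : Int) (max_n : Int) : List String :=
  (PySem.List.pyRange min_n (max_n + 1) 1).foldl (fun ngrams n =>
    (PySem.List.pyRange 0 ((tokens.length : Int) - n + 1) 1).foldl (fun ngrams i =>
      let gram_tokens := PySem.List.slice tokens (some i) (some (i + n))
      if gram_tokens = [] then ngrams
      else if pvStops.contains (PySem.List.pyGetD gram_tokens 0 "") ||
              pvStops.contains (PySem.List.pyGetD gram_tokens (-1) "") then ngrams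
      else ngrams ++ [PySem.Str.join " " gram_tokens]) ngrams) []

-- ===== PORT B =====
def generate_english_ngrams_alt (tokens : List String) (min_n : Int) (max_n : Int) : List String :=
  let lo := max min_n 1
  if lo > max_n then []
  else
    let buckets : PySem.Dict Int (List String) :=
      (PySem.List.enumerate tokens 0).foldl (fun bks p =>
        if pvStops.contains p.2 then bks
        else
          ((PySem.List.enumerate (PySem.List.slice tokens (some p.1) (some (p.1 + max_n))) 1).foldl
            (fun (st : PySem.Dict Int (List String) × String) q =>
              let gram := if q.1 > 1 then st.2 ++ " " ++ q.2 else st.2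
              ((if lo ≤ q.1 ∧ pvStops.contains q.2 = false then
                  st.1.modify q.1 [] (· ++ [gram]) else st.1), gram))
            (bks, p.2)).1) PySem.Dict.empty
    (PySem.List.pyRange lo (max_n + 1) 1).foldl (fun out n => out ++ buckets.getD n []) []

-- ===== PRECONDITION & SPEC =====
def pvGood (tokens : List String) (i : Nat) : Bool := !(pvStops.contains (tokens.getD i ""))

-- When min_n is negative and some negative n in [min_n, min(max_n, -1)] makes Python's
-- slice tokens[i:i+n] wrap (i+n<0) into a nonempty (len(tokens)+n)-gram passing the
-- stopword filter, A returns those spurious wraparound grams ahead of the real ones,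
-- while B returns only grams of positive length — the intended meaning of an n-gram range.
def D_generate_english_ngrams (tokens : List String) (min_n : Int) (max_n : Int) : Prop :=
  ∃ n ∈ PySem.List.pyRange (max min_n (1 - (tokens.length : Int))) (min (max_n + 1) 0) 1,
    ∃ i ∈ List.range (-n).toNat,
      pvGood tokens i = true ∧
      pvGood tokens (i + ((tokens.length : Int) + n).toNat - 1) = true

instance (tokens : List String) (min_n : Int) (max_n : Int) : Decidable (D_generate_english_ngrams tokens min_n max_n) := by
  unfold D_generate_english_ngrams; infer_instance

def Spec_generate_english_ngrams (tokens : List String) (min_n : Int) (max_n : Int) (out : List String) : Prop :=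
  ¬ D_generate_english_ngrams tokens min_n max_n → out = generate_english_ngrams_alt tokens min_n max_n

instance (tokens : List String) (min_n : Int) (max_n : Int) (out : List String) : Decidable (Spec_generate_english_ngrams tokens min_n max_n out) := by
  unfold Spec_generate_english_ngrams; infer_instance

def pvDiffWitness_generate_english_ngrams : List String × Int × Int := (["x", "y"], -1, 1)
def pvDiffWitnessOut_generate_english_ngrams : (List String) × (List String) :=
  (["x", "x", "y"], ["x", "y"])

-- ===== CLAIM =====
def Claim_unchanged_generate_english_ngrams : Prop := ∀ (tokens : List String) (min_n : Int) (max_n : Int), Dom_generate_english_ngrams tokens min_n max_n → Spec_generate_english_ngrams tokens min_n max_n (generate_english_ngrams tokens min_n max_n)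
def Claim_changed_generate_english_ngrams : Prop := Dom_generate_english_ngrams (pvDiffWitness_generate_english_ngrams.1) (pvDiffWitness_generate_english_ngrams.2.1) (pvDiffWitness_generate_english_ngrams.2.2) ∧ D_generate_english_ngrams (pvDiffWitness_generate_english_ngrams.1) (pvDiffWitness_generate_english_ngrams.2.1) (pvDiffWitness_generate_english_ngrams.2.2) ∧ generate_english_ngrams (pvDiffWitness_generate_english_ngrams.1) (pvDiffWitness_generate_english_ngrams.2.1) (pvDiffWitness_generate_english_ngrams.2.2) = pvDiffWitnessOut_generate_english_ngrams.1 ∧ generate_english_ngrams_alt (pvDiffWitness_generate_english_ngrams.1) (pvDiffWitness_generate_english_ngrams.2.1) (pvDiffWitness_generate_english_ngrams.2.2) = pvDiffWitnessOut_generate_english_ngrams.2 ∧ pvDiffWitnessOut_generate_english_ngrams.1 ≠ pvDiffWitnessOut_generate_english_ngrams.2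
def Claim_exact_generate_english_ngrams : Prop := ∀ (tokens : List String) (min_n : Int) (max_n : Int), Dom_generate_english_ngrams tokens min_n max_n → D_generate_english_ngrams tokens min_n max_n → generate_english_ngrams tokens min_n max_n ≠ generate_english_ngrams_alt tokens min_n max_n

-- ===== LEMMAS AND PROOFS =====

-- shared vocabulary
def pvTok (tokens : List String) (i : Nat) : String := tokens.getD i ""
def pvGram (tokens : List String) (i n : Nat) : String :=
  PySem.Str.join " " ((tokens.drop i).take n)
def pvCond (tokens : List String) (i n : Nat) : Bool :=
  pvGood tokens i && pvGood tokens (i + n - 1)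
def pvRow (tokens : List String) (n : Nat) : List String :=
  ((List.range (tokens.length + 1 - n)).filter (fun i => pvCond tokens i n)).map
    (fun i => pvGram tokens i n)
def pvNegRow (tokens : List String) (n : Int) : List String :=
  if (tokens.length : Int) + n < 1 then []
  else ((List.range (-n).toNat).filter
          (fun i => pvCond tokens i ((tokens.length : Int) + n).toNat)).map
        (fun i => pvGram tokens i ((tokens.length : Int) + n).toNat)
def pvGroupA (tokens : List String) (n : Int) : List String :=
  if 1 ≤ n then pvRow tokens n.toNat else pvNegRow tokens n

-- generic loop shapes
theorem pv_foldl_emit {α β : Type} (l : List α) (F : List β → α → List β) (g : α → List β)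
    (h : ∀ acc x, x ∈ l → F acc x = acc ++ g x) :
    ∀ acc, l.foldl F acc = acc ++ l.flatMap g := by
  induction l with
  | nil => intro acc; simp
  | cons x xs ih =>
    intro acc
    rw [List.foldl_cons, h acc x (by simp), ih (fun a y hy => h a y (by simp [hy]))]
    simp

theorem pv_foldl_nested {α β : Type} (l : List α) (f : β → Int × String → β)
    (h : α → List (Int × String)) :
    ∀ (d : β), l.foldl (fun d i => (h i).foldl f d) d = (l.flatMap h).foldl f d := by
  induction l with
  | nil => intro d; simp
  | cons x xs ih => intro d; simp [List.foldl_append, ih]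

theorem pv_flatMap_ite_singleton {α : Type} (l : List Nat) (p : Nat → Bool) (f : Nat → α) :
    l.flatMap (fun i => if p i then [f i] else []) = (l.filter p).map f := by
  induction l with
  | nil => rfl
  | cons x xs ih =>
    by_cases hx : p x <;> simp [hx, ih]



theorem pv_foldl_str_prefix (l : List String) : ∀ (a x : String),
    l.foldl (fun b t => b ++ " " ++ t) (a ++ x) = a ++ l.foldl (fun b t => b ++ " " ++ t) x := by
  induction l with
  | nil => intro a x; rfl
  | cons y ys ih =>
    intro a x
    simp only [List.foldl_cons]
    have e : a ++ x ++ " " ++ y = a ++ (x ++ " " ++ y) := by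
      rw [String.append_assoc, String.append_assoc, String.append_assoc]
    rw [e]
    exact ih a (x ++ " " ++ y)

theorem pv_join_cons (x : String) (l : List String) :
    PySem.Str.join " " (x :: l) = l.foldl (fun a t => a ++ " " ++ t) x := by
  induction l generalizing x with
  | nil => simp [PySem.Str.join]
  | cons y ys ih =>
    have step : PySem.Str.join " " (x :: y :: ys) = x ++ " " ++ PySem.Str.join " " (y :: ys) := by
      simp only [PySem.Str.join, PySem.Chars.join_cons_cons, List.map_cons]
      apply String.ext
      simp [String.toList_append, String.toList_ofList]
    rw [step, ih y, List.foldl_cons]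
    rw [show x ++ " " ++ y = (x ++ " ") ++ y from rfl]
    rw [pv_foldl_str_prefix ys (x ++ " ") y]

theorem pv_flatMap_range_shrink {α : Type} (g : Nat → List α) (a b : Nat) (hba : b ≤ a)
    (h : ∀ i, b ≤ i → g i = []) :
    (List.range a).flatMap g = (List.range b).flatMap g := by
  induction a with
  | zero => have : b = 0 := by omega
            simp [this]
  | succ m ih =>
    by_cases hbm : b ≤ m
    · rw [List.range_succ, List.flatMap_append, ih hbm]
      simp [h m hbm]
    · have : b = m + 1 := by omega
      simp [this]

theorem pv_take_drop_getD_zero (tokens : List String) (k m : Nat)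
    (hm : 1 ≤ m) (_hk : k < tokens.length) :
    ((tokens.drop k).take m).getD 0 "" = tokens.getD k "" := by
  rw [List.getD_eq_getElem?_getD, List.getD_eq_getElem?_getD, List.getElem?_take, List.getElem?_drop]
  simp [Nat.lt_of_lt_of_le (by omega : (0:Nat) < m) (by omega : m ≤ m)]

theorem pv_take_drop_length (tokens : List String) (k m : Nat) (h : k + m ≤ tokens.length) :
    ((tokens.drop k).take m).length = m := by
  simp [List.length_take, List.length_drop]; omega

theorem pv_take_drop_getLast (tokens : List String) (k m : Nat)
    (hm : 1 ≤ m) (h : k + m ≤ tokens.length) (hne : (tokens.drop k).take m ≠ []) :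
    ((tokens.drop k).take m).getLast hne = tokens.getD (k + m - 1) "" := by
  have hlen : ((tokens.drop k).take m).length = m := pv_take_drop_length tokens k m h
  have : k + m - 1 < tokens.length := by omega
  rw [List.getD_eq_getElem?_getD, List.getElem?_eq_getElem this]
  rw [List.getLast_eq_getElem]
  simp only [List.getElem_take, List.getElem_drop, hlen, Option.getD_some]
  congr 1
  omega

-- the per-start emission of A's inner loop, as a function of the Int index
def pvEmit (tokens : List String) (n : Int) (i : Int) : List String :=
  let gt := PySem.List.slice tokens (some i) (some (i + n))
  if gt = [] then []
  else if pvStops.contains (PySem.List.pyGetD gt 0 "") ||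
          pvStops.contains (PySem.List.pyGetD gt (-1) "") then []
  else [PySem.Str.join " " gt]

theorem pv_clampIdx_neg (Len : Nat) (x : Int) (hx : x < 0) :
    (PySem.List.clampIdx Len x : Int) = max ((Len : Int) + x) 0 := by
  have hk : 0 < (-x).toNat := by omega
  have hx' : x = -((-x).toNat : Int) := by omega
  rw [hx', PySem.List.clampIdx_neg_natCast _ _ hk]
  omega

theorem pv_clampIdx_nonneg (Len : Nat) (x : Int) (hx : 0 ≤ x) :
    (PySem.List.clampIdx Len x : Int) = min x Len := by
  have hx' : x = ((x.toNat : Nat) : Int) := by omega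
  rw [hx', PySem.List.clampIdx_natCast]
  omega

theorem pv_clampIdx_cases (Len : Nat) (x : Int) :
    (PySem.List.clampIdx Len x : Int) = max ((Len : Int) + x) 0 ∧ x < 0 ∨
    (PySem.List.clampIdx Len x : Int) = min x Len ∧ 0 ≤ x := by
  rcases lt_or_ge x 0 with h | h
  · exact Or.inl ⟨pv_clampIdx_neg Len x h, h⟩
  · exact Or.inr ⟨pv_clampIdx_nonneg Len x h, h⟩

theorem pvEmit_core (tokens : List String) (n : Int) (m k : Nat) (hm : 1 ≤ m)
    (hk : k + m ≤ tokens.length)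
    (hs : PySem.List.slice tokens (some (k : Int)) (some ((k : Int) + n)) = (tokens.drop k).take m) :
    pvEmit tokens n (k : Int) = if pvCond tokens k m then [pvGram tokens k m] else [] := by
  have hne : (tokens.drop k).take m ≠ [] := by
    have := pv_take_drop_length tokens k m hk
    intro hnil; rw [hnil] at this; simp at this; omega
  unfold pvEmit
  simp only [hs, hne, if_false]
  rw [PySem.List.pyGetD_zero, PySem.List.pyGetD_neg_one (h := hne)]
  rw [pv_take_drop_getD_zero tokens k m hm (by omega)]
  rw [pv_take_drop_getLast tokens k m hm hk hne]
  unfold pvCond pvGood pvGram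
  split_ifs <;> simp_all

theorem pvEmit_pos (tokens : List String) (m k : Nat) (hm : 1 ≤ m) (hk : k + m ≤ tokens.length) :
    pvEmit tokens (m : Int) (k : Int) = if pvCond tokens k m then [pvGram tokens k m] else [] :=
  pvEmit_core tokens m m k hm hk (PySem.List.slice_natCast_add tokens k m)

theorem pv_slice_eq_clamp {α : Type} (xs : List α) (a b : Int) :
    PySem.List.slice xs (some a) (some b)
      = (xs.drop (PySem.List.clampIdx xs.length a)).take
          (PySem.List.clampIdx xs.length b - PySem.List.clampIdx xs.length a) := by
  simp [PySem.List.slice]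

theorem pvEmit_neg (tokens : List String) (n : Int) (k : Nat)
    (hn : n ≤ -1) (hk : (k : Int) < -n) (hL : 1 ≤ (tokens.length : Int) + n) :
    pvEmit tokens n (k : Int)
      = if pvCond tokens k ((tokens.length : Int) + n).toNat
        then [pvGram tokens k ((tokens.length : Int) + n).toNat] else [] := by
  set L := tokens.length with hLdef
  set m := ((L : Int) + n).toNat with hmdef
  have hc1 : (PySem.List.clampIdx L ((k : Int)) : Int) = k := by
    rw [pv_clampIdx_nonneg _ _ (by omega)]; omega
  have hc2 : (PySem.List.clampIdx L ((k : Int) + n) : Int) = (L : Int) + k + n := by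
    rw [pv_clampIdx_neg _ _ (by omega)]; omega
  apply pvEmit_core tokens n m k (by omega) (by omega)
  rw [pv_slice_eq_clamp]
  have e1 : PySem.List.clampIdx tokens.length ((k : Int)) = k := by
    rw [← hLdef]; omega
  have e2 : PySem.List.clampIdx tokens.length ((k : Int) + n) - k = m := by
    rw [← hLdef]; omega
  rw [e1, e2]

theorem pvEmit_nil (tokens : List String) (n i : Int)
    (h : PySem.List.clampIdx tokens.length (i + n) ≤ PySem.List.clampIdx tokens.length i) :
    pvEmit tokens n i = [] := by
  have hlen : (PySem.List.slice tokens (some i) (some (i + n))).length = 0 := by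
    rw [PySem.List.length_slice]; omega
  unfold pvEmit
  simp [List.eq_nil_of_length_eq_zero hlen]

-- ===== A-side characterization =====
theorem pvA_flat (tokens : List String) (n : Int) :
    (PySem.List.pyRange 0 ((tokens.length : Int) - n + 1) 1).flatMap (pvEmit tokens n)
      = pvGroupA tokens n := by
  by_cases hn1 : 1 ≤ n
  · -- positive n: the real rows
    have hm : n = (n.toNat : Int) := by omega
    set m := n.toNat with hmdef
    unfold pvGroupA
    rw [if_pos hn1]
    by_cases hLm : tokens.length < m
    · have : (tokens.length : Int) - n + 1 ≤ 0 := by omega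
      rw [PySem.List.pyRange_one_eq_nil this]
      unfold pvRow
      have : tokens.length + 1 - m = 0 := by omega
      rw [this]
      simp
    · rw [PySem.List.pyRange_one]
      have hKt : (((tokens.length : Int) - n + 1) - 0).toNat = tokens.length + 1 - m := by omega
      rw [hKt, List.flatMap_map]
      have hcong : ∀ k ∈ List.range (tokens.length + 1 - m),
          pvEmit tokens n ((0 : Int) + (k : Nat)) =
            (fun k => if pvCond tokens k m then [pvGram tokens k m] else []) k := by
        intro k hk
        have hkm : k + m ≤ tokens.length := by
          have := List.mem_range.mp hk; omega
        simp only [zero_add]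
        rw [hm]
        exact pvEmit_pos tokens m k (by omega) hkm
      rw [List.flatMap_def, List.map_congr_left hcong, ← List.flatMap_def]
      rw [pv_flatMap_ite_singleton]
      rfl
  · -- nonpositive n: only wraparound rows (or nothing)
    unfold pvGroupA
    rw [if_neg hn1]
    unfold pvNegRow
    by_cases hLn : (tokens.length : Int) + n < 1
    · rw [if_pos hLn]
      apply List.flatMap_eq_nil_iff.mpr
      intro i hi
      have hmem := (PySem.List.mem_pyRange_one).mp hi
      apply pvEmit_nil
      rcases pv_clampIdx_cases tokens.length i with ⟨c1, hs1⟩ | ⟨c1, hs1⟩ <;>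
        rcases pv_clampIdx_cases tokens.length (i + n) with ⟨c2, hs2⟩ | ⟨c2, hs2⟩ <;> omega
    · rw [if_neg hLn]
      set m := ((tokens.length : Int) + n).toNat with hmdef
      rw [PySem.List.pyRange_one]
      rw [List.flatMap_map]
      have hsh : ((((tokens.length : Int) - n + 1) - 0).toNat) ≥ (-n).toNat := by omega
      have htail : ∀ k, (-n).toNat ≤ k →
          (fun k : Nat => pvEmit tokens n ((0 : Int) + (k : Nat))) k = [] := by
        intro k hk
        simp only [zero_add]
        apply pvEmit_nil
        rcases pv_clampIdx_cases tokens.length ((k : Nat) : Int) with ⟨c1, hs1⟩ | ⟨c1, hs1⟩ <;>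
          rcases pv_clampIdx_cases tokens.length ((k : Nat) + n) with ⟨c2, hs2⟩ | ⟨c2, hs2⟩ <;> omega
      rw [pv_flatMap_range_shrink _ _ _ hsh htail]
      have hcong : ∀ k ∈ List.range (-n).toNat,
          (fun k : Nat => pvEmit tokens n ((0 : Int) + (k : Nat))) k =
            (fun k => if pvCond tokens k m then [pvGram tokens k m] else []) k := by
        intro k hk
        have hkn : (k : Int) < -n := by
          have := List.mem_range.mp hk; omega
        simp only [zero_add]
        exact pvEmit_neg tokens n k (by omega) hkn (by omega)
      rw [List.flatMap_def, List.map_congr_left hcong, ← List.flatMap_def]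
      rw [pv_flatMap_ite_singleton]

theorem pvA_eq (tokens : List String) (min_n max_n : Int) :
    generate_english_ngrams tokens min_n max_n
      = ((PySem.List.pyRange min_n (max_n + 1) 1).map (pvGroupA tokens)).flatten := by
  unfold generate_english_ngrams
  have hbody : ∀ (acc : List String) (n : Int), n ∈ PySem.List.pyRange min_n (max_n + 1) 1 →
      (PySem.List.pyRange 0 ((tokens.length : Int) - n + 1) 1).foldl
        (fun ngrams i =>
          let gram_tokens := PySem.List.slice tokens (some i) (some (i + n))
          if gram_tokens = [] then ngrams
          else if pvStops.contains (PySem.List.pyGetD gram_tokens 0 "") ||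
                  pvStops.contains (PySem.List.pyGetD gram_tokens (-1) "") then ngrams
          else ngrams ++ [PySem.Str.join " " gram_tokens]) acc = acc ++ pvGroupA tokens n := by
    intro acc n _
    rw [pv_foldl_emit _ _ (pvEmit tokens n) (fun acc2 i _ => by
      unfold pvEmit; simp only []; split_ifs <;> simp) acc]
    rw [pvA_flat tokens n]
  rw [pv_foldl_emit _ _ (pvGroupA tokens) hbody []]
  simp [List.flatMap_def]

-- ===== B-side characterization =====
-- the event stream of B's inner loop: (length, gram) pairs in emission order
def pvMkEvts (lo : Int) : Int → String → List String → List (Int × String)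
  | _, _, [] => []
  | s, g, t :: rest =>
    let g' := if s > 1 then g ++ " " ++ t else g
    (if lo ≤ s ∧ pvStops.contains t = false then [(s, g')] else []) ++ pvMkEvts lo (s + 1) g' rest

theorem pvB1 (lo : Int) : ∀ (seg : List String) (s : Int) (g : String) (d : PySem.Dict Int (List String)),
    ((PySem.List.enumerate seg s).foldl
      (fun (st : PySem.Dict Int (List String) × String) q =>
        let gram := if q.1 > 1 then st.2 ++ " " ++ q.2 else st.2
        ((if lo ≤ q.1 ∧ pvStops.contains q.2 = false then st.1.modify q.1 [] (· ++ [gram]) else st.1), gram))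
      (d, g)).1
    = (pvMkEvts lo s g seg).foldl (fun d p => d.modify p.1 [] (· ++ [p.2])) d := by
  intro seg
  induction seg with
  | nil => intro s g d; simp [PySem.List.enumerate_nil, pvMkEvts]
  | cons t rest ih =>
    intro s g d
    rw [PySem.List.enumerate_cons, List.foldl_cons]
    simp only [pvMkEvts]
    rw [List.foldl_append]
    by_cases hcnd : lo ≤ s ∧ pvStops.contains t = false
    · simp only [hcnd, if_pos, and_self]
      rw [ih (s + 1) _ _]
      simp [hcnd]
    · simp only [hcnd, if_neg, not_false_eq_true]
      rw [ih (s + 1) _ _]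
      simp [hcnd]

theorem pvB2a (lo : Int) : ∀ (seg : List String) (s : Int) (g : String) (nn : Int), nn < s →
    (pvMkEvts lo s g seg).filter (fun p => p.1 == nn) = [] := by
  intro seg
  induction seg with
  | nil => intro s g nn _; simp [pvMkEvts]
  | cons t rest ih =>
    intro s g nn hlt
    simp only [pvMkEvts, List.filter_append]
    rw [ih (s + 1) _ nn (by omega)]
    split_ifs <;> simp <;> omega

theorem pvB2b (lo : Int) : ∀ (seg : List String) (s : Int) (g : String) (j : Nat), 2 ≤ s →
    (pvMkEvts lo s g seg).filter (fun p => p.1 == s + (j : Int)) =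
      (if j < seg.length ∧ lo ≤ s + (j : Int) ∧ pvStops.contains (seg.getD j "") = false
       then [(s + (j : Int), (seg.take (j + 1)).foldl (fun a t => a ++ " " ++ t) g)] else []) := by
  intro seg
  induction seg with
  | nil => intro s g j _; simp [pvMkEvts]
  | cons t rest ih =>
    intro s g j hs
    have hg : (if s > 1 then g ++ " " ++ t else g) = g ++ " " ++ t := if_pos (by omega)
    simp only [pvMkEvts, hg, List.filter_append]
    cases j with
    | zero =>
      simp only [Nat.cast_zero, add_zero]
      rw [pvB2a lo rest (s + 1) (g ++ " " ++ t) s (by omega)]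
      split_ifs <;> simp_all
    | succ j' =>
      have hcast : s + ((j' + 1 : Nat) : Int) = (s + 1) + (j' : Int) := by push_cast; omega
      rw [hcast, ih (s + 1) (g ++ " " ++ t) j' (by omega)]
      have hhead : List.filter (fun p => p.1 == (s + 1) + (j' : Int))
          (if lo ≤ s ∧ pvStops.contains t = false then [(s, g ++ " " ++ t)] else []) = [] := by
        split_ifs <;> simp <;> omega
      rw [hhead, List.nil_append]
      simp only [List.length_cons, List.getD_cons_succ, List.take_succ_cons, List.foldl_cons,
        Nat.succ_lt_succ_iff]

theorem pv_foldl_congr {α β : Type} (l : List α) (F G : β → α → β)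
    (h : ∀ b x, x ∈ l → F b x = G b x) : ∀ b, l.foldl F b = l.foldl G b := by
  induction l with
  | nil => intro b; rfl
  | cons x xs ih =>
    intro b
    rw [List.foldl_cons, List.foldl_cons, h b x (by simp)]
    exact ih (fun b y hy => h b y (by simp [hy])) _

theorem pv_filtermap_flatMap {α β γ : Type} (l : List α) (h : α → List β) (p : β → Bool) (f : β → γ) :
    ((l.flatMap h).filter p).map f = l.flatMap (fun x => ((h x).filter p).map f) := by
  induction l with
  | nil => rfl
  | cons x xs ih => simp [List.filter_append, List.map_append, ih]

-- contribution of one non-stopword start position k to the bucket of length nn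
theorem pvContrib (tokens : List String) (lo max_n : Int) (k : Nat) (nn : Int)
    (hlo : 1 ≤ lo) (hnn : lo ≤ nn) (hmax : nn ≤ max_n) (hk : k < tokens.length)
    (hgood : pvStops.contains (tokens.getD k "") = false) :
    ((pvMkEvts lo 1 (tokens.getD k "")
        (PySem.List.slice tokens (some (k : Int)) (some ((k : Int) + max_n)))).filter
      (fun p => p.1 == nn)).map (·.2)
    = if k + nn.toNat ≤ tokens.length ∧ pvGood tokens (k + nn.toNat - 1)
      then [pvGram tokens k nn.toNat] else [] := by
  have hM : 1 ≤ max_n.toNat := by omega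
  have hsl : PySem.List.slice tokens (some (k : Int)) (some ((k : Int) + max_n))
      = (tokens.drop k).take max_n.toNat := by
    rw [PySem.List.slice_toNat tokens (by omega) (by omega)]
    congr 1
    omega
  have hdrop : tokens.drop k = tokens.getD k "" :: tokens.drop (k + 1) := by
    rw [List.drop_eq_getElem_cons hk, List.getD_eq_getElem?_getD, List.getElem?_eq_getElem hk]
    rfl
  set t := tokens.getD k "" with ht
  set rest := (tokens.drop (k + 1)).take (max_n.toNat - 1) with hrest
  have hseg : (tokens.drop k).take max_n.toNat = t :: rest := by
    rw [hdrop]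
    have : max_n.toNat = (max_n.toNat - 1) + 1 := by omega
    rw [this, List.take_succ_cons]
  rw [hsl, hseg]
  have hunf : pvMkEvts lo 1 t (t :: rest)
      = (if lo ≤ 1 ∧ pvStops.contains t = false then [(1, t)] else []) ++ pvMkEvts lo 2 t rest := by
    simp [pvMkEvts]
  rw [hunf, List.filter_append, List.map_append]
  by_cases h1 : nn = 1
  · subst h1
    rw [pvB2a lo rest 2 t 1 (by omega)]
    have : lo ≤ 1 ∧ pvStops.contains t = false := ⟨hnn, hgood⟩
    rw [if_pos this]
    have hkL : k + (1 : Int).toNat ≤ tokens.length := by omega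
    have hgd : pvGood tokens (k + (1 : Int).toNat - 1) = true := by
      unfold pvGood; simp [ht] at hgood ⊢; exact hgood
    rw [if_pos ⟨hkL, hgd⟩]
    have hgram : pvGram tokens k 1 = t := by
      unfold pvGram
      rw [hdrop]
      simp [PySem.Str.join]
    simp [hgram]
  · -- nn ≥ 2
    have h2 : 2 ≤ nn := by omega
    obtain ⟨j, rfl⟩ : ∃ j : Nat, nn = 2 + (j : Int) := ⟨(nn - 2).toNat, by omega⟩
    have htn : (2 + (j : Int)).toNat = j + 2 := by omega
    rw [htn]
    have hhead : List.filter (fun p => p.1 == 2 + (j : Int))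
        (if lo ≤ 1 ∧ pvStops.contains t = false then [(1, t)] else []) = [] := by
      split_ifs <;> simp <;> omega
    rw [hhead]
    simp only [List.map_nil, List.nil_append]
    rw [pvB2b lo rest 2 t j (by omega)]
    have hrl : rest.length = min (max_n.toNat - 1) (tokens.length - (k + 1)) := by
      rw [hrest]; simp
    have hj2 : j + 2 ≤ max_n.toNat := by omega
    have hcnd : (j < rest.length ↔ k + (j + 2) ≤ tokens.length) := by
      rw [hrl, Nat.lt_min]; omega
    have hgetd : rest.getD j "" = tokens.getD (k + (j + 2) - 1) "" := by
      rw [hrest, List.getD_eq_getElem?_getD, List.getD_eq_getElem?_getD, List.getElem?_take, List.getElem?_drop]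
      by_cases hjl : j < max_n.toNat - 1
      · rw [if_pos hjl]
        rw [show k + (j + 2) - 1 = k + 1 + j from by omega]
      · rw [if_neg hjl]
        have : tokens.length ≤ k + (j + 2) - 1 := by omega
        rw [List.getElem?_eq_none (by omega)]
    have hgram : (rest.take (j + 1)).foldl (fun a t => a ++ " " ++ t) t = pvGram tokens k (j + 2) := by
      rw [← pv_join_cons]
      unfold pvGram
      congr 1
      have e1 : t :: rest.take (j + 1) = (t :: rest).take (j + 2) := by rw [List.take_succ_cons]
      rw [e1, ← hseg, List.take_take]
      congr 1
      omega
    rw [hgram]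
    unfold pvGood
    simp only [Bool.not_eq_true']
    by_cases hin : k + (j + 2) ≤ tokens.length ∧ pvStops.contains (tokens.getD (k + (j + 2) - 1) "") = false
    · rw [if_pos ⟨hcnd.mpr hin.1, hnn, by rw [hgetd]; exact hin.2⟩]
      rw [if_pos hin]
      rfl
    · rw [if_neg (by
        intro ⟨ha, hb, hcc⟩
        exact hin ⟨hcnd.mp ha, by rw [← hgetd]; exact hcc⟩)]
      rw [if_neg hin]
      rfl

theorem pvBucket_row (tokens : List String) (lo max_n nn : Int)
    (hlo : 1 ≤ lo) (hnn : lo ≤ nn) (hmax : nn ≤ max_n) :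
    (((PySem.List.enumerate tokens 0).flatMap (fun p =>
        if pvStops.contains p.2 then []
        else pvMkEvts lo 1 p.2 (PySem.List.slice tokens (some p.1) (some (p.1 + max_n))))).filter
      (fun p => p.1 == nn)).map (·.2) = pvRow tokens nn.toNat := by
  set m := nn.toNat with hmdef
  rw [pv_filtermap_flatMap]
  rw [PySem.List.enumerate_eq_map_pyRange tokens ""]
  rw [List.flatMap_map]
  rw [PySem.List.pyRange_one]
  rw [List.flatMap_map]
  have hL0 : ((PySem.List.len tokens : Int) - 0).toNat = tokens.length := by
    simp [PySem.List.len]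
  rw [hL0]
  have hcong : ∀ k ∈ List.range tokens.length,
      (fun k : Nat =>
        ((List.filter (fun p => p.1 == nn)
          (if pvStops.contains ((0 : Int) + (k : Int), PySem.List.pyGetD tokens ((0 : Int) + (k : Int)) "").2 then []
           else pvMkEvts lo 1 ((0 : Int) + (k : Int), PySem.List.pyGetD tokens ((0 : Int) + (k : Int)) "").2
             (PySem.List.slice tokens (some ((0 : Int) + (k : Int), PySem.List.pyGetD tokens ((0 : Int) + (k : Int)) "").1)
               (some (((0 : Int) + (k : Int), PySem.List.pyGetD tokens ((0 : Int) + (k : Int)) "").1 + max_n))))).map (·.2))) k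
      = (fun k : Nat => if k + m ≤ tokens.length ∧ pvCond tokens k m then [pvGram tokens k m] else []) k := by
    intro k hk
    have hkL : k < tokens.length := List.mem_range.mp hk
    simp only [zero_add, PySem.List.pyGetD_natCast]
    by_cases hstop : pvStops.contains (tokens.getD (k : Nat) "")
    · rw [if_pos (by simpa using hstop)]
      simp only [List.filter_nil, List.map_nil]
      rw [if_neg]
      intro ⟨_, hcnd⟩
      unfold pvCond at hcnd
      have h1 := ((Bool.and_eq_true _ _).mp hcnd).1
      unfold pvGood at h1
      rw [hstop] at h1
      simp at h1
    · rw [if_neg (by simpa using hstop)]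
      have hgd : pvStops.contains (tokens.getD (k : Nat) "") = false := by
        simpa using hstop
      rw [pvContrib tokens lo max_n k nn hlo hnn hmax hkL hgd]
      rw [← hmdef]
      have hcondiff : (k + m ≤ tokens.length ∧ pvGood tokens (k + m - 1) = true)
          ↔ (k + m ≤ tokens.length ∧ pvCond tokens k m = true) := by
        unfold pvCond pvGood
        rw [hgd]
        simp
      split_ifs with hA hB hB
      · rfl
      · exact absurd (hcondiff.mp hA) hB
      · exact absurd (hcondiff.mpr hB) hA
      · rfl
  rw [List.flatMap_def, List.map_congr_left hcong, ← List.flatMap_def]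
  have hm1 : 1 ≤ m := by omega
  rw [pv_flatMap_range_shrink _ tokens.length (tokens.length + 1 - m) (by omega)
    (fun k hk => by
      rw [if_neg]
      intro ⟨ha, _⟩
      omega)]
  have hcong2 : ∀ k ∈ List.range (tokens.length + 1 - m),
      (fun k : Nat => if k + m ≤ tokens.length ∧ pvCond tokens k m then [pvGram tokens k m] else []) k
      = (fun k : Nat => if pvCond tokens k m then [pvGram tokens k m] else []) k := by
    intro k hk
    dsimp only
    have := List.mem_range.mp hk
    by_cases hc : pvCond tokens k m
    · rw [if_pos ⟨by omega, hc⟩, if_pos hc]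
    · rw [if_neg (by intro ⟨_, hcc⟩; exact hc hcc), if_neg hc]
  rw [List.flatMap_def, List.map_congr_left hcong2, ← List.flatMap_def]
  rw [pv_flatMap_ite_singleton]
  rfl

theorem pvB_eq (tokens : List String) (min_n max_n : Int) (h : max min_n 1 ≤ max_n) :
    generate_english_ngrams_alt tokens min_n max_n
      = ((PySem.List.pyRange (max min_n 1) (max_n + 1) 1).map
          (fun n => pvRow tokens n.toNat)).flatten := by
  unfold generate_english_ngrams_alt
  rw [if_neg (by omega)]
  set lo := max min_n 1 with hlo
  set d0 := (PySem.List.enumerate tokens 0).foldl (fun bks p =>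
        if pvStops.contains p.2 then bks
        else
          ((PySem.List.enumerate (PySem.List.slice tokens (some p.1) (some (p.1 + max_n))) 1).foldl
            (fun (st : PySem.Dict Int (List String) × String) q =>
              let gram := if q.1 > 1 then st.2 ++ " " ++ q.2 else st.2
              ((if lo ≤ q.1 ∧ pvStops.contains q.2 = false then
                  st.1.modify q.1 [] (· ++ [gram]) else st.1), gram))
            (bks, p.2)).1) PySem.Dict.empty with hd0
  rw [pv_foldl_emit _ _ (fun n => d0.getD n []) (fun acc x _ => rfl) []]
  rw [List.nil_append]
  have hd0' : d0 = ((PySem.List.enumerate tokens 0).flatMap (fun p =>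
      if pvStops.contains p.2 then []
      else pvMkEvts lo 1 p.2 (PySem.List.slice tokens (some p.1) (some (p.1 + max_n))))).foldl
        (fun d p => d.modify p.1 [] (· ++ [p.2])) PySem.Dict.empty := by
    rw [hd0]
    rw [pv_foldl_congr _ _ (fun bks p =>
        (if pvStops.contains p.2 then []
         else pvMkEvts lo 1 p.2 (PySem.List.slice tokens (some p.1) (some (p.1 + max_n)))).foldl
          (fun d q => d.modify q.1 [] (· ++ [q.2])) bks) ?hcg PySem.Dict.empty]
    · rw [pv_foldl_nested]
    case hcg =>
      intro bks p _
      dsimp only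
      by_cases hstop : pvStops.contains p.2
      · rw [if_pos hstop, if_pos hstop]
        rfl
      · rw [if_neg hstop, if_neg hstop]
        exact pvB1 lo _ 1 p.2 bks
  have hget : ∀ nn ∈ PySem.List.pyRange lo (max_n + 1) 1, d0.getD nn [] = pvRow tokens nn.toNat := by
    intro nn hnn
    have hm := PySem.List.mem_pyRange_one.mp hnn
    rw [hd0']
    rw [PySem.Dict.getD_foldl_modify_append]
    rw [PySem.Dict.getD_empty, List.nil_append]
    exact pvBucket_row tokens lo max_n nn (by omega) (by omega) (by omega)
  rw [List.flatMap_def, List.map_congr_left hget]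

theorem pvB_nil (tokens : List String) (min_n max_n : Int) (h : max_n < max min_n 1) :
    generate_english_ngrams_alt tokens min_n max_n = [] := by
  unfold generate_english_ngrams_alt
  rw [if_pos (by omega)]

-- negative groups vanish outside D_
theorem pvNegRow_nil (tokens : List String) (min_n max_n : Int)
    (hD : ¬ D_generate_english_ngrams tokens min_n max_n)
    (n : Int) (h1 : min_n ≤ n) (h2 : n ≤ max_n) (h3 : n ≤ 0) :
    pvGroupA tokens n = [] := by
  unfold pvGroupA
  rw [if_neg (by omega)]
  unfold pvNegRow
  split_ifs with hL
  · rfl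
  · have hfil : (List.range (-n).toNat).filter
        (fun i => pvCond tokens i ((tokens.length : Int) + n).toNat) = [] := by
      apply List.filter_eq_nil_iff.mpr
      intro i hi hc
      have hi' := List.mem_range.mp hi
      have hn0 : n < 0 := by omega
      apply hD
      refine ⟨n, PySem.List.mem_pyRange_one.mpr ⟨by omega, by omega⟩, i, List.mem_range.mpr hi', ?_, ?_⟩
      · have := (Bool.and_eq_true _ _).mp hc
        exact this.1
      · have := (Bool.and_eq_true _ _).mp hc
        exact this.2
    rw [hfil]
    rfl

theorem pvA_split (tokens : List String) (min_n max_n : Int)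
    (hD : ¬ D_generate_english_ngrams tokens min_n max_n)
    (hc : max min_n 1 ≤ max_n) :
    generate_english_ngrams tokens min_n max_n
      = ((PySem.List.pyRange (max min_n 1) (max_n + 1) 1).map
          (fun n => pvRow tokens n.toNat)).flatten := by
  rw [pvA_eq]
  rw [PySem.List.pyRange_one_append min_n (max min_n 1) (max_n + 1) (by omega) (by omega)]
  rw [List.map_append, List.flatten_append]
  have h1 : ((PySem.List.pyRange min_n (max min_n 1) 1).map (pvGroupA tokens)).flatten = [] := by
    apply List.flatten_eq_nil_iff.mpr
    intro l hl
    obtain ⟨nn, hnn, rfl⟩ := List.mem_map.mp hl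
    have hm := PySem.List.mem_pyRange_one.mp hnn
    exact pvNegRow_nil tokens min_n max_n hD nn hm.1 (by omega) (by omega)
  rw [h1, List.nil_append]
  congr 1
  apply List.map_congr_left
  intro nn hnn
  have hm := PySem.List.mem_pyRange_one.mp hnn
  unfold pvGroupA
  rw [if_pos (by omega)]

-- ===== VERDICT =====
theorem generate_english_ngrams_spec : Claim_unchanged_generate_english_ngrams := by
  unfold Claim_unchanged_generate_english_ngrams
  intro tokens min_n max_n _ hD
  by_cases hc : max min_n 1 ≤ max_n
  · rw [pvA_split tokens min_n max_n hD hc, pvB_eq tokens min_n max_n hc]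
  · rw [pvB_nil tokens min_n max_n (by omega)]
    rw [pvA_eq]
    apply List.flatten_eq_nil_iff.mpr
    intro l hl
    obtain ⟨nn, hnn, rfl⟩ := List.mem_map.mp hl
    have hm := PySem.List.mem_pyRange_one.mp hnn
    exact pvNegRow_nil tokens min_n max_n hD nn hm.1 (by omega) (by omega)

theorem generate_english_ngrams_changed : Claim_changed_generate_english_ngrams := by
  unfold Claim_changed_generate_english_ngrams; decide

theorem generate_english_ngrams_tight : Claim_exact_generate_english_ngrams := by
  unfold Claim_exact_generate_english_ngrams
  intro tokens min_n max_n _ hD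
  obtain ⟨n, hn, i, hi, hg1, hg2⟩ := hD
  have hmem := PySem.List.mem_pyRange_one.mp hn
  have hi' := List.mem_range.mp hi
  have hn0 : n < 0 := by omega
  have hL : 1 ≤ (tokens.length : Int) + n := by omega
  -- the spurious group at n is nonempty
  have hgrp : pvGroupA tokens n ≠ [] := by
    unfold pvGroupA
    rw [if_neg (by omega)]
    unfold pvNegRow
    rw [if_neg (by omega)]
    intro hnil
    rw [List.map_eq_nil_iff, List.filter_eq_nil_iff] at hnil
    have hfalse := by simpa using hnil i (List.mem_range.mpr hi')
    have htrue : pvCond tokens i ((tokens.length : Int) + n).toNat = true := by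
      unfold pvCond; rw [hg1, hg2]; rfl
    rw [htrue] at hfalse
    exact absurd hfalse (by simp)
  have hmemA : pvGroupA tokens n ∈ (PySem.List.pyRange min_n (max min_n 1) 1).map (pvGroupA tokens) := by
    apply List.mem_map_of_mem
    exact PySem.List.mem_pyRange_one.mpr ⟨by omega, by omega⟩
  by_cases hc : max min_n 1 ≤ max_n
  · rw [pvB_eq tokens min_n max_n hc, pvA_eq]
    rw [PySem.List.pyRange_one_append min_n (max min_n 1) (max_n + 1) (by omega) (by omega)]
    rw [List.map_append, List.flatten_append]
    set Bpart := ((PySem.List.pyRange (max min_n 1) (max_n + 1) 1).map (pvGroupA tokens)).flatten with hB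
    set Neg := ((PySem.List.pyRange min_n (max min_n 1) 1).map (pvGroupA tokens)).flatten with hNeg
    have hNegNe : Neg ≠ [] := by
      rw [hNeg]
      intro hnil
      exact hgrp (List.flatten_eq_nil_iff.mp hnil _ hmemA)
    have hBeq : Bpart = ((PySem.List.pyRange (max min_n 1) (max_n + 1) 1).map
        (fun n => pvRow tokens n.toNat)).flatten := by
      rw [hB]
      congr 1
      apply List.map_congr_left
      intro nn hnn
      have hm := PySem.List.mem_pyRange_one.mp hnn
      unfold pvGroupA
      rw [if_pos (by omega)]
    rw [← hBeq]
    intro heq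
    have : (Neg ++ Bpart).length = Bpart.length := by rw [heq]
    rw [List.length_append] at this
    have : Neg.length = 0 := by omega
    exact hNegNe (List.eq_nil_of_length_eq_zero this)
  · rw [pvB_nil tokens min_n max_n (by omega)]
    rw [pvA_eq]
    intro hnil
    apply hgrp
    apply List.flatten_eq_nil_iff.mp hnil
    apply List.mem_map_of_mem
    exact PySem.List.mem_pyRange_one.mpr ⟨by omega, by omega⟩
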